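-- pv_equiv track=rewrite | github.com/Radhika74/LeetCode | 07_July_2025/Week4/max_score_after_removing_substrings.py | calc
-- ===== SOURCE A (Python) =====
-- def calc(tmp: str, x: int, y: int) -> int:
--     res = 0
--
--     if x >= y:
--         b = 0
--         a = 0
--         for ch in tmp:
--             if ch == 'b':
--                 if a > 0:
--                     a -= 1
--                     res += x
--                 else:
--                     b += 1
--             else:
--                 a += 1
--         res += min(a, b) * y
--     else:
--         b = 0
--         a = 0
--         for ch in tmp:
--             if ch == 'a':
--                 if b > 0:
--                     b -= 1
--                     res += y
--                 else:
--                     a += 1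
--             else:
--                 b += 1
--         res += min(a, b) * x
--
--     return res
-- ===== SOURCE B (Python) =====
-- def calc(tmp: str, x: int, y: int) -> int:
--     # Two stack passes: first remove the higher-valued pair greedily, then the lower-valued one.
--     def pass1(seq, cl):
--         st = []
--         n = 0
--         for ch in seq:
--             if ch == cl and st and st[-1] != cl:
--                 st.pop()
--                 n += 1
--             else:
--                 st.append(ch)
--         return st, n
--
--     def pass2(seq, cl):
--         st = []
--         n = 0
--         for ch in seq:
--             if ch != cl and st and st[-1] == cl:
--                 st.pop()
--                 n += 1
--             else:
--                 st.append(ch)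
--         return n
--
--     if x >= y:
--         rest, n1 = pass1(tmp, 'b')
--         return n1 * x + pass2(rest, 'b') * y
--     else:
--         rest, n1 = pass1(tmp, 'a')
--         return n1 * y + pass2(rest, 'a') * x
-- ===== Notes on version B (the rewrite author's own statement) =====
-- stated objective: alternative
-- what changed: Replaced A's two counter-based tallies (count unmatched openers/closers, then min(a,b)) by the classic two-pass explicit stack removal: pass 1 pops the higher-valued pair off a stack as it is completed, pass 2 runs the same stack technique over the leftover characters for the lower-valued pair.
import Mathlib
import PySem

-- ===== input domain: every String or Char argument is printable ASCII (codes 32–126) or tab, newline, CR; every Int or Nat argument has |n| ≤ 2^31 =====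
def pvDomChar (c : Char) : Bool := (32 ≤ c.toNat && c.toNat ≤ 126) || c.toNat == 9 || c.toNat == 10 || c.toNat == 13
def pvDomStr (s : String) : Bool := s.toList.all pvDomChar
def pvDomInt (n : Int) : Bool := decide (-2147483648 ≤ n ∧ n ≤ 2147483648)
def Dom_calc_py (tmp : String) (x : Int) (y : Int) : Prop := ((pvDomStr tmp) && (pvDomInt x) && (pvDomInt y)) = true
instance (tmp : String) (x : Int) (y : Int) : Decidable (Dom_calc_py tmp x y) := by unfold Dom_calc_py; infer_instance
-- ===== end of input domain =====

-- B replaces A's counter bookkeeping by two explicit stack passes (remove the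
-- higher-valued pair first, then the lower-valued pair from the leftover);
-- objective: alternative decomposition, same cost.

-- ===== PORT A =====
-- one loop iteration of A: state (res, b, a); 'cl' is the closing letter ('b' resp. 'a'), 's' its score
def pvAStep (cl : Char) (s : Int) (st : Int × Int × Int) (ch : Char) : Int × Int × Int :=
  let (res, b, a) := st
  if ch = cl then
    if a > 0 then (res + s, b, a - 1) else (res, b + 1, a)
  else (res, b, a + 1)

def calc_py (tmp : String) (x : Int) (y : Int) : Int :=
  if x ≥ y then
    let (res, _b, a) := tmp.toList.foldl (pvAStep 'b' x) (0, 0, 0)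
    -- Python: res += min(a, b) * y  (the foldl's middle component is b)
    res + min a (tmp.toList.foldl (pvAStep 'b' x) (0, 0, 0)).2.1 * y
  else
    let (res, _b, a) := tmp.toList.foldl (pvAStep 'a' y) (0, 0, 0)
    res + min a (tmp.toList.foldl (pvAStep 'a' y) (0, 0, 0)).2.1 * x

-- ===== PORT B =====
-- stack step of B's first pass: pop when ch == cl and top ≠ cl (stack head = top;
-- Python's list keeps the bottom first, so the result is reversed before pass 2)
def pvStep1 (cl : Char) (st : List Char × Int) (ch : Char) : List Char × Int :=
  match st with
  | (t :: stk, n) => if ch = cl ∧ t ≠ cl then (stk, n + 1) else (ch :: t :: stk, n)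
  | ([], n) => ([ch], n)

-- stack step of B's second pass: pop when ch ≠ cl and top = cl
def pvStep2 (cl : Char) (st : List Char × Int) (ch : Char) : List Char × Int :=
  match st with
  | (t :: stk, n) => if ch ≠ cl ∧ t = cl then (stk, n + 1) else (ch :: t :: stk, n)
  | ([], n) => ([ch], n)

def calc_py_alt (tmp : String) (x : Int) (y : Int) : Int :=
  if x ≥ y then
    let (stk, n1) := tmp.toList.foldl (pvStep1 'b') ([], 0)
    n1 * x + (stk.reverse.foldl (pvStep2 'b') ([], 0)).2 * y
  else
    let (stk, n1) := tmp.toList.foldl (pvStep1 'a') ([], 0)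
    n1 * y + (stk.reverse.foldl (pvStep2 'a') ([], 0)).2 * x

-- ===== PRECONDITION & SPEC =====
def Spec_calc_py (tmp : String) (x : Int) (y : Int) (out : Int) : Prop := out = calc_py_alt tmp x y
instance (tmp : String) (x : Int) (y : Int) (out : Int) : Decidable (Spec_calc_py tmp x y out) := by unfold Spec_calc_py; infer_instance

-- ===== CLAIM (what is proved, stated in full; the proofs are below) =====
def Claim_equal_calc_py : Prop := ∀ (tmp : String) (x : Int) (y : Int), Dom_calc_py tmp x y → Spec_calc_py tmp x y (calc_py tmp x y)

-- ===== LEMMAS AND PROOFS =====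

-- Pass-1 simulation: the stack always has the shape (non-cl chars) ++ (cl chars),
-- and its two block lengths are exactly A's counters a and b, while A's res grows by s per pop.
theorem pass1_sim (cl : Char) (s : Int) :
    ∀ (cs w : List Char) (β : Nat) (n r : Int), (∀ c ∈ w, c ≠ cl) →
    ∃ (w' : List Char) (β' k : Nat),
      (∀ c ∈ w', c ≠ cl) ∧
      cs.foldl (pvStep1 cl) (w ++ List.replicate β cl, n) = (w' ++ List.replicate β' cl, n + (k : Int)) ∧
      cs.foldl (pvAStep cl s) (r, (β : Int), (w.length : Int)) = (r + (k : Int) * s, (β' : Int), (w'.length : Int)) := by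
  intro cs
  induction cs with
  | nil =>
    intro w β n r hw
    exact ⟨w, β, 0, hw, by simp, by simp⟩
  | cons c cs ih =>
    intro w β n r hw
    by_cases hc : c = cl
    · subst hc
      cases w with
      | cons d w'' =>
        have hd : d ≠ c := hw d (by simp)
        have hstep1 : pvStep1 c (d :: w'' ++ List.replicate β c, n) c = (w'' ++ List.replicate β c, n + 1) := by
          simp [pvStep1, hd]
        have hstepA : pvAStep c s (r, (β : Int), ((d :: w'').length : Int)) c
            = (r + s, (β : Int), (w''.length : Int)) := by
          simp [pvAStep]
        obtain ⟨w', β', k, hw', h1, h2⟩ := ih w'' β (n + 1) (r + s) (fun c hx => hw c (by simp [hx]))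
        refine ⟨w', β', k + 1, hw', ?_, ?_⟩
        · simp only [List.foldl_cons, hstep1, h1]; congr 1; push_cast; ring
        · simp only [List.foldl_cons, hstepA, h2]; congr 1; push_cast; ring
      | nil =>
        obtain ⟨w', β', k, hw', h1, h2⟩ := ih [] (β + 1) n r (by simp)
        refine ⟨w', β', k, hw', ?_, ?_⟩
        · have : pvStep1 c (([] : List Char) ++ List.replicate β c, n) c
              = ([] ++ List.replicate (β + 1) c, n) := by
            cases β with
            | zero => simp [pvStep1]
            | succ m => simp [pvStep1, List.replicate_succ]
          simp only [List.foldl_cons, this, h1]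
        · simp only [List.foldl_cons]
          rw [show pvAStep c s (r, (β : Int), (([] : List Char).length : Int)) c
              = (r, ((β + 1 : Nat) : Int), (([] : List Char).length : Int)) by
            simp [pvAStep]]
          exact h2
    · -- c is not the closing letter: both sides push / increment a
      have hstep1 : pvStep1 cl (w ++ List.replicate β cl, n) c
          = ((c :: w) ++ List.replicate β cl, n) := by
        cases w with
        | cons d w'' => simp [pvStep1, hc]
        | nil =>
          cases β with
          | zero => simp [pvStep1]
          | succ m => simp [pvStep1, List.replicate_succ, hc]
      have hstepA : pvAStep cl s (r, (β : Int), (w.length : Int)) c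
          = (r, (β : Int), (((c :: w).length : Nat) : Int)) := by
        simp [pvAStep, hc]
      obtain ⟨w', β', k, hw', h1, h2⟩ := ih (c :: w) β n r (by
        intro e he; rcases List.mem_cons.mp he with h | h
        · simpa [h] using hc
        · exact hw e h)
      refine ⟨w', β', k, hw', ?_, ?_⟩
      · simp only [List.foldl_cons, hstep1, h1]
      · simp only [List.foldl_cons, hstepA, h2]

-- Pass-2, phase 1: the leading block of cl's is pushed unchanged.
theorem pass2_push (cl : Char) : ∀ (β γ : Nat) (n : Int),
    List.foldl (pvStep2 cl) (List.replicate γ cl, n) (List.replicate β cl)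
      = (List.replicate (β + γ) cl, n) := by
  intro β
  induction β with
  | zero => simp
  | succ m ih =>
    intro γ n
    have hstep : pvStep2 cl (List.replicate γ cl, n) cl = (List.replicate (γ + 1) cl, n) := by
      cases γ with
      | zero => simp [pvStep2]
      | succ g => simp [pvStep2, List.replicate_succ]
    calc List.foldl (pvStep2 cl) (List.replicate γ cl, n) (List.replicate (m + 1) cl)
        = List.foldl (pvStep2 cl) (List.replicate (γ + 1) cl, n) (List.replicate m cl) := by
          rw [List.replicate_succ, List.foldl_cons, hstep]
      _ = (List.replicate (m + (γ + 1)) cl, n) := ih (γ + 1) n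
      _ = (List.replicate (m + 1 + γ) cl, n) := by congr 2; omega

-- Pass-2, dead phase: with only non-cl chars on the stack and in the input, nothing pops.
theorem pass2_dead (cl : Char) : ∀ (u v : List Char) (n : Int),
    (∀ c ∈ u, c ≠ cl) → (∀ c ∈ v, c ≠ cl) →
    (List.foldl (pvStep2 cl) (v, n) u).2 = n := by
  intro u
  induction u with
  | nil => simp
  | cons d u' ih =>
    intro v n hu hv
    have hd : d ≠ cl := hu d (by simp)
    have hstep : pvStep2 cl (v, n) d = (d :: v, n) := by
      cases v with
      | nil => simp [pvStep2]
      | cons t v' => simp [pvStep2, hv t (by simp)]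
    rw [List.foldl_cons, hstep]
    exact ih (d :: v) n (fun c hc => hu c (by simp [hc]))
      (by intro c hc; rcases List.mem_cons.mp hc with h | h
          · simpa [h] using hd
          · exact hv c h)

-- Pass-2, phase 2: each non-cl char pops one cl while any remain; count = min.
theorem pass2_pop (cl : Char) : ∀ (u : List Char) (γ : Nat) (n : Int),
    (∀ c ∈ u, c ≠ cl) →
    (List.foldl (pvStep2 cl) (List.replicate γ cl, n) u).2 = n + (min γ u.length : Nat) := by
  intro u
  induction u with
  | nil => simp
  | cons d u' ih =>
    intro γ n hu
    have hd : d ≠ cl := hu d (by simp)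
    cases γ with
    | zero =>
      have : (List.foldl (pvStep2 cl) (([] : List Char), n) (d :: u')).2 = n :=
        pass2_dead cl (d :: u') [] n hu (by simp)
      simpa using this
    | succ g =>
      have hstep : pvStep2 cl (List.replicate (g + 1) cl, n) d = (List.replicate g cl, n + 1) := by
        simp [pvStep2, List.replicate_succ, hd]
      rw [List.foldl_cons, hstep, ih g (n + 1) (fun c hc => hu c (by simp [hc]))]
      have : min (g + 1) (d :: u').length = min g u'.length + 1 := by
        simp only [List.length_cons]; omega
      rw [this]; push_cast; ring

-- One branch of the equivalence, generic in the closing letter and the two scores.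
theorem branch_eq (cl : Char) (s1 s2 : Int) (cs : List Char) :
    (cs.foldl (pvAStep cl s1) (0, 0, 0)).1
      + min (cs.foldl (pvAStep cl s1) (0, 0, 0)).2.2 (cs.foldl (pvAStep cl s1) (0, 0, 0)).2.1 * s2
    = (cs.foldl (pvStep1 cl) ([], 0)).2 * s1
      + ((cs.foldl (pvStep1 cl) ([], 0)).1.reverse.foldl (pvStep2 cl) ([], 0)).2 * s2 := by
  obtain ⟨w', β', k, hw', h1, h2⟩ := pass1_sim cl s1 cs [] 0 0 0 (by simp)
  simp only [List.nil_append, List.replicate_zero, List.length_nil, Nat.cast_zero] at h1 h2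
  rw [h1, h2]
  have hrev : (w' ++ List.replicate β' cl).reverse = List.replicate β' cl ++ w'.reverse := by
    rw [List.reverse_append, List.reverse_replicate]
  have hsplit : ((w' ++ List.replicate β' cl).reverse.foldl (pvStep2 cl) ([], 0)).2
      = (min β' w'.length : Nat) := by
    rw [hrev, List.foldl_append]
    have := pass2_push cl β' 0 0
    simp only [List.replicate_zero] at this
    rw [show (List.foldl (pvStep2 cl) (([] : List Char), (0 : Int)) (List.replicate β' cl))
        = (List.replicate (β' + 0) cl, 0) from this]
    have := pass2_pop cl w'.reverse (β' + 0) 0 (by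
      intro c hc; exact hw' c (List.mem_reverse.mp hc))
    rw [this]; simp
  simp only [hsplit]
  have hmin : min ((w'.length : Int)) ((β' : Int)) = ((min β' w'.length : Nat) : Int) := by
    push_cast; omega
  rw [hmin]; ring

theorem calc_branches (tmp : String) (x y : Int) : calc_py tmp x y = calc_py_alt tmp x y := by
  unfold calc_py calc_py_alt
  by_cases h : x ≥ y
  · simp only [h, if_true]
    have := branch_eq 'b' x y tmp.toList
    simpa using this
  · simp only [h, if_false]
    have := branch_eq 'a' y x tmp.toList
    simpa using this

-- ===== VERDICT (by name: the statement is the Claim_ definition above) =====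
theorem calc_py_spec : Claim_equal_calc_py := by
  intro tmp x y _
  unfold Spec_calc_py
  exact calc_branches tmp x y
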